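-- pv_equiv track=rewrite | github.com/seoulmango/AlgorithmStudy2022 | Implementation/BOJ_Implementation/BOJ_17144_미세먼지.py | wind
-- ===== SOURCE A (Python) =====
-- import copy
--
-- def wind(room, cleaner):
--     newroom = copy.deepcopy(room)
--
--     R = len(newroom)
--     C = len(newroom[0])
--
--     # 공기 청정기 좌표
--     x1 = cleaner[0][0]
--     x2 = cleaner[1][0]
--
--     # 공기 청정기 바로 오른쪽은 0
--     newroom[x1][1] = 0
--     newroom[x2][1] = 0
--
--     # 오른쪽으로 이동하는 줄
--     for i in range(1, C-1):
--         newroom[x1][i + 1] = room[x1][i]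
--         newroom[x2][i + 1] = room[x2][i]
--
--     # 상체 위 이동
--     for i in range(x1-1, -1, -1):
--         newroom[i][-1] = room[i+1][-1]
--
--
--     # 상체 왼쪽 이동
--     for i in range(C-2, -1, -1):
--         newroom[0][i] = room[0][i+1]
--
--     # 상체 아래 이동
--     for i in range(1, x1):
--         newroom[i][0] = room[i-1][0]
--
--     # 하체 아래 이동
--     for i in range(1, R-x2):
--         newroom[x2 + i][C-1] = room[x2 + i -1][C-1]
--
--     # 하체 왼쪽 이동
--     for i in range(C-2, -1, -1):
--         newroom[R-1][i] = room[R-1][i+1]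
--
--     # 하체 위에 이동
--     for i in range(R-2, x2, -1):
--         newroom[i][0] = room[i+1][0]
--
--     return newroom
-- ===== SOURCE B (Python) =====
-- def wind(room, cleaner):
--     R = len(room)
--     C = len(room[0])
--     x1 = cleaner[0][0]
--     x2 = cleaner[1][0]
--     out = [row[:] for row in room]
--     # cells next to each purifier become clean air
--     out[x1][1] = 0
--     out[x2][1] = 0
--     # the rightward shift along both purifier rows is identical: do it in one pass
--     for j in range(2, C):
--         out[x1][j] = room[x1][j - 1]
--         out[x2][j] = room[x2][j - 1]
--     # remainder of each ring: rotate values one step along the precomputed perimeter path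
--     # (upper ring runs counter-clockwise, lower ring clockwise; the right edge of the
--     # upper ring is addressed as each row's last cell, like the shift that feeds it)
--     upper = [(i, -1) for i in range(x1 - 1, -1, -1)] \
--         + [(0, j) for j in range(C - 2, -1, -1)] \
--         + [(i, 0) for i in range(1, x1)]
--     lower = [(x2 + i, C - 1) for i in range(1, R - x2)] \
--         + [(R - 1, j) for j in range(C - 2, -1, -1)] \
--         + [(i, 0) for i in range(R - 2, x2, -1)]
--     for path, prev in ((upper, (x1, -1)), (lower, (x2, C - 1))):
--         for cell in path:
--             out[cell[0]][cell[1]] = room[prev[0]][prev[1]]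
--             prev = cell
--     return out
-- ===== Notes on version B (the rewrite author's own statement) =====
-- stated objective: alternative
-- what changed: A's six directional ring-segment loops are replaced by two precomputed perimeter coordinate paths, each rotated by one position in a single traversal reading from the original room, and the identical right-shift of the two purifier rows is fused into one loop.
import Mathlib
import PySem

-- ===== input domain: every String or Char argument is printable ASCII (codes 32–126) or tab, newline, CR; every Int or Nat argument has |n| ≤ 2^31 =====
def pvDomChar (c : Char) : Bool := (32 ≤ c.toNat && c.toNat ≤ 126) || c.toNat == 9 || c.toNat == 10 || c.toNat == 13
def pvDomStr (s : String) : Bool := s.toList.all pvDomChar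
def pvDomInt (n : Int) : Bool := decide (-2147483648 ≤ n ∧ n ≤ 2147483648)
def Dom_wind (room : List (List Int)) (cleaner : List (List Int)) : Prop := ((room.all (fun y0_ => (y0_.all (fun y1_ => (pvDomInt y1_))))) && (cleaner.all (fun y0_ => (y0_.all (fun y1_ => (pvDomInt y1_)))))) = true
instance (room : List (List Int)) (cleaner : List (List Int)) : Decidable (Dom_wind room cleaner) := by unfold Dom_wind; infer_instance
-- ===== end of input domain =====

-- B replaces A's six directional ring-segment loops by two precomputed perimeter paths, each
-- rotated in one traversal, and fuses the identical right-shift of the two purifier rows into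
-- a single loop (objective: alternative decomposition, same cost).

-- Shared Python-semantics helpers for both ports: `get2 g i j` is g[i][j] (negative index from
-- the end), `setRow`/`set2` are Python's `row[j] = v` / `g[i][j] = v`; on the inputs admitted
-- by Pre_wind every index that occurs is one Python accepts.
def get2 (g : List (List Int)) (i j : Int) : Int :=
  (PySem.List.pyGet? ((PySem.List.pyGet? g i).getD []) j).getD 0
def nrm (i : Int) (n : Nat) : Nat := (if i < 0 then i + n else i).toNat
def setRow (row : List Int) (j v : Int) : List Int := row.set (nrm j row.length) v
def set2 (g : List (List Int)) (i j v : Int) : List (List Int) :=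
  g.set (nrm i g.length) (setRow ((g[nrm i g.length]?).getD []) j v)

-- ===== PORT A =====
def wind (room : List (List Int)) (cleaner : List (List Int)) : List (List Int) :=
  let newroom := room
  let R : Int := room.length
  let C : Int := ((PySem.List.pyGet? room 0).getD []).length
  let x1 : Int := get2 cleaner 0 0
  let x2 : Int := get2 cleaner 1 0
  let g1 := set2 newroom x1 1 0
  let g2 := set2 g1 x2 1 0
  let g3 := (PySem.List.pyRange 1 (C-1) 1).foldl
    (fun g i => set2 (set2 g x1 (i+1) (get2 room x1 i)) x2 (i+1) (get2 room x2 i)) g2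
  let g4 := (PySem.List.pyRange (x1-1) (-1) (-1)).foldl
    (fun g i => set2 g i (-1) (get2 room (i+1) (-1))) g3
  let g5 := (PySem.List.pyRange (C-2) (-1) (-1)).foldl
    (fun g i => set2 g 0 i (get2 room 0 (i+1))) g4
  let g6 := (PySem.List.pyRange 1 x1 1).foldl
    (fun g i => set2 g i 0 (get2 room (i-1) 0)) g5
  let g7 := (PySem.List.pyRange 1 (R-x2) 1).foldl
    (fun g i => set2 g (x2+i) (C-1) (get2 room (x2+i-1) (C-1))) g6
  let g8 := (PySem.List.pyRange (C-2) (-1) (-1)).foldl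
    (fun g i => set2 g (R-1) i (get2 room (R-1) (i+1))) g7
  let g9 := (PySem.List.pyRange (R-2) x2 (-1)).foldl
    (fun g i => set2 g i 0 (get2 room (i+1) 0)) g8
  g9

-- ===== PORT B =====
def wind_alt (room : List (List Int)) (cleaner : List (List Int)) : List (List Int) :=
  let R : Int := room.length
  let C : Int := ((PySem.List.pyGet? room 0).getD []).length
  let x1 : Int := get2 cleaner 0 0
  let x2 : Int := get2 cleaner 1 0
  let out := room
  let g1 := set2 out x1 1 0
  let g2 := set2 g1 x2 1 0
  let g3 := (PySem.List.pyRange 2 C 1).foldl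
    (fun g j => set2 (set2 g x1 j (get2 room x1 (j-1))) x2 j (get2 room x2 (j-1))) g2
  let upper : List (Int × Int) :=
    (PySem.List.pyRange (x1-1) (-1) (-1)).map (fun i => (i, (-1:Int)))
    ++ (PySem.List.pyRange (C-2) (-1) (-1)).map (fun j => ((0:Int), j))
    ++ (PySem.List.pyRange 1 x1 1).map (fun i => (i, (0:Int)))
  let lower : List (Int × Int) :=
    (PySem.List.pyRange 1 (R-x2) 1).map (fun i => (x2+i, C-1))
    ++ (PySem.List.pyRange (C-2) (-1) (-1)).map (fun j => (R-1, j))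
    ++ (PySem.List.pyRange (R-2) x2 (-1)).map (fun i => (i, (0:Int)))
  let step := fun (st : List (List Int) × (Int × Int)) (c : Int × Int) =>
    (set2 st.1 c.1 c.2 (get2 room st.2.1 st.2.2), c)
  let s1 := upper.foldl step (g3, (x1, -1))
  let s2 := lower.foldl step (s1.1, (x2, C-1))
  s2.1

-- ===== PRECONDITION & SPEC =====
-- Pre_wind spells out exactly the index bounds A's accesses need (grid and purifier-row shapes,
-- so A raises on nothing Pre_ admits), and additionally excludes a negative first purifier row
-- index: there A still returns, but only through Python's negative-index wraparound, which makes
-- the upper ring degenerate — an artefact of A's indexing that B does not reproduce.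
def Pre_wind (room : List (List Int)) (cleaner : List (List Int)) : Prop :=
  1 ≤ room.length ∧ 1 ≤ (room.headD []).length ∧
  2 ≤ cleaner.length ∧ 1 ≤ (cleaner.getD 0 []).length ∧ 1 ≤ (cleaner.getD 1 []).length ∧
  0 ≤ (cleaner.getD 0 []).getD 0 0 ∧
  (cleaner.getD 0 []).getD 0 0 < (room.length : Int) ∧
  -(room.length : Int) ≤ (cleaner.getD 1 []).getD 0 0 ∧
  (cleaner.getD 1 []).getD 0 0 < (room.length : Int) ∧
  2 ≤ (room.getD ((cleaner.getD 0 []).getD 0 0).toNat []).length ∧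
  2 ≤ (room.getD (if (cleaner.getD 1 []).getD 0 0 < 0 then (cleaner.getD 1 []).getD 0 0 + (room.length : Int) else (cleaner.getD 1 []).getD 0 0).toNat []).length ∧
  (3 ≤ (room.headD []).length →
    (room.headD []).length ≤ (room.getD ((cleaner.getD 0 []).getD 0 0).toNat []).length ∧
    (room.headD []).length ≤ (room.getD (if (cleaner.getD 1 []).getD 0 0 < 0 then (cleaner.getD 1 []).getD 0 0 + (room.length : Int) else (cleaner.getD 1 []).getD 0 0).toNat []).length) ∧
  (∀ i ∈ List.range room.length,
    ((i : Int) ≤ (cleaner.getD 0 []).getD 0 0 → 1 ≤ (room.getD i []).length) ∧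
    ((if 0 ≤ (cleaner.getD 1 []).getD 0 0 then (cleaner.getD 1 []).getD 0 0 else 0) ≤ (i : Int) →
      (room.headD []).length ≤ (room.getD i []).length))

instance (room : List (List Int)) (cleaner : List (List Int)) : Decidable (Pre_wind room cleaner) := by
  unfold Pre_wind; infer_instance

def pvWitness_wind : List (List Int) × List (List Int) :=
  ([[1,2],[3,4],[5,6],[7,8]], [[1],[2]])

def Spec_wind (room : List (List Int)) (cleaner : List (List Int)) (out : List (List Int)) : Prop := out = wind_alt room cleaner
instance (room : List (List Int)) (cleaner : List (List Int)) (out : List (List Int)) : Decidable (Spec_wind room cleaner out) := by unfold Spec_wind; infer_instance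

-- ===== CLAIM (what is proved, stated in full; the proofs are below) =====
def Claim_equal_wind : Prop := ∀ (room : List (List Int)) (cleaner : List (List Int)), Dom_wind room cleaner → Pre_wind room cleaner → Spec_wind room cleaner (wind room cleaner)

-- ===== LEMMAS AND PROOFS =====
def applyW (g : List (List Int)) (w : (Int × Int) × Int) : List (List Int) :=
  set2 g w.1.1 w.1.2 w.2

def Wseg (r : List (List Int)) (s d : Int × Int) (n : Nat) : List ((Int × Int) × Int) :=
  (List.range n).map (fun k : Nat =>
    ((s.1 + (k : Int) * d.1, s.2 + (k : Int) * d.2),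
     get2 r (s.1 + ((k : Int) - 1) * d.1) (s.2 + ((k : Int) - 1) * d.2)))

def writesP (r : List (List Int)) : (Int × Int) → List (Int × Int) → List ((Int × Int) × Int)
  | _, [] => []
  | p, c :: cs => (c, get2 r p.1 p.2) :: writesP r c cs

def mixSeg (r : List (List Int)) (x1 x2 : Int) (C : Nat) : List ((Int × Int) × Int) :=
  (List.range (C-2)).flatMap (fun k : Nat =>
    [((x1, 1+(k:Int)+1), get2 r x1 (1+(k:Int))), ((x2, 1+(k:Int)+1), get2 r x2 (1+(k:Int)))])

def upperW (r : List (List Int)) (x1 : Int) (C : Nat) : List ((Int × Int) × Int) :=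
  Wseg r (x1-1, -1) (-1,0) x1.toNat
    ++ (Wseg r (0, (C:Int)-2) (0,-1) (C-1) ++ Wseg r (1,0) (1,0) (x1-1).toNat)

def lowerW (r : List (List Int)) (x2 : Int) (R C : Nat) : List ((Int × Int) × Int) :=
  Wseg r (x2+1, (C:Int)-1) (1,0) ((R:Int)-x2-1).toNat
    ++ (Wseg r ((R:Int)-1, (C:Int)-2) (0,-1) (C-1) ++ Wseg r ((R:Int)-2, 0) (-1,0) ((R:Int)-2-x2).toNat)

def listAll (r : List (List Int)) (x1 x2 : Int) (R C : Nat) : List ((Int × Int) × Int) :=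
  ((x1,1),(0:Int)) :: ((x2,1),(0:Int)) :: (mixSeg r x1 x2 C ++ (upperW r x1 C ++ lowerW r x2 R C))

theorem foldl_set2_map (a b v : Nat → Int) (l : List Nat) :
    ∀ g : List (List Int),
      l.foldl (fun g k => set2 g (a k) (b k) (v k)) g
        = (l.map (fun k => ((a k, b k), v k))).foldl applyW g := by
  induction l with
  | nil => intro g; rfl
  | cons x l ih => intro g; simp only [List.foldl_cons, List.map_cons, applyW]; exact ih _

theorem foldl_pair_set2_map (a1 b1 v1 a2 b2 v2 : Nat → Int) (l : List Nat) :
    ∀ g : List (List Int),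
      l.foldl (fun g k => set2 (set2 g (a1 k) (b1 k) (v1 k)) (a2 k) (b2 k) (v2 k)) g
        = (l.flatMap (fun k => [((a1 k, b1 k), v1 k), ((a2 k, b2 k), v2 k)])).foldl applyW g := by
  induction l with
  | nil => intro g; rfl
  | cons x l ih =>
    intro g
    simp only [List.foldl_cons, List.flatMap_cons, List.cons_append, List.nil_append, applyW]
    exact ih _

theorem map_wseg_flex (r : List (List Int)) (w : Nat → (Int × Int) × Int) (n : Nat)
    (s1 s2 d1 d2 : Int)
    (hw : ∀ k, k < n → w k = ((s1 + (k:Int)*d1, s2 + (k:Int)*d2),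
        get2 r (s1 + ((k:Int)-1)*d1) (s2 + ((k:Int)-1)*d2))) :
    (List.range n).map w = Wseg r (s1,s2) (d1,d2) n := by
  unfold Wseg
  apply List.map_congr_left
  intro k hk
  rw [hw k (List.mem_range.mp hk)]

theorem flatMap_pair_congr {α β : Type} (w1 w2 w1' w2' : α → β) (l : List α)
    (h : ∀ a ∈ l, w1 a = w1' a ∧ w2 a = w2' a) :
    l.flatMap (fun a => [w1 a, w2 a]) = l.flatMap (fun a => [w1' a, w2' a]) := by
  induction l with
  | nil => rfl
  | cons x l ih =>
    simp only [List.flatMap_cons]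
    rw [(h x List.mem_cons_self).1, (h x List.mem_cons_self).2,
        ih (fun a ha => h a (List.mem_cons_of_mem _ ha))]

theorem getLast?_map_range {α : Type} (f : Nat → α) (n : Nat) :
    ((List.range (n+1)).map f).getLast? = some (f n) := by
  rw [List.range_succ]
  simp

theorem foldl_stepP (room : List (List Int)) :
    ∀ (path : List (Int × Int)) (g : List (List Int)) (p : Int × Int),
      path.foldl (fun (st : List (List Int) × (Int × Int)) (c : Int × Int) =>
          (set2 st.1 c.1 c.2 (get2 room st.2.1 st.2.2), c)) (g, p)
      = ((writesP room p path).foldl applyW g, path.getLast?.getD p) := by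
  intro path
  induction path with
  | nil => intro g p; simp [writesP]
  | cons c cs ih =>
    intro g p
    simp only [List.foldl_cons, writesP, applyW]
    rw [ih]
    refine Prod.ext rfl ?_
    cases cs with
    | nil => simp
    | cons b t =>
      rw [List.getLast?_cons_cons]
      cases h : (b :: t).getLast? with
      | none => simp at h
      | some x => simp

theorem writesP_append (r : List (List Int)) :
    ∀ (l1 l2 : List (Int × Int)) (p : Int × Int),
      writesP r p (l1 ++ l2) = writesP r p l1 ++ writesP r (l1.getLast?.getD p) l2 := by
  intro l1
  induction l1 with
  | nil => intro l2 p; simp [writesP]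
  | cons a l1 ih =>
    intro l2 p
    have hlast : (a :: l1).getLast?.getD p = l1.getLast?.getD a := by
      cases l1 with
      | nil => simp
      | cons b t =>
        rw [List.getLast?_cons_cons]
        cases h : (b :: t).getLast? with
        | none => simp at h
        | some x => simp
    simp only [List.cons_append, writesP]
    rw [ih l2 a, hlast]

theorem writesP_wseg (r : List (List Int)) (d : Int × Int) :
    ∀ (n : Nat) (s : Int × Int) (p : Int × Int),
      get2 r p.1 p.2 = get2 r (s.1 - d.1) (s.2 - d.2) →
      writesP r p ((List.range n).map (fun k : Nat => (s.1 + (k : Int) * d.1, s.2 + (k : Int) * d.2)))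
        = Wseg r s d n := by
  intro n
  induction n with
  | zero => intro s p hp; simp [writesP, Wseg]
  | succ n ih =>
    intro s p hp
    simp only [Wseg, List.range_succ_eq_map, List.map_cons, List.map_map, writesP]
    have e1 : ((fun k : Nat => (s.1 + (k:Int) * d.1, s.2 + (k:Int) * d.2)) ∘ Nat.succ)
        = (fun k : Nat => ((s.1 + d.1) + (k:Int) * d.1, (s.2 + d.2) + (k:Int) * d.2)) := by
      funext k
      refine Prod.ext ?_ ?_ <;> (simp only [Function.comp]; push_cast; ring)
    have e2 : (List.range n).map
        ((fun k : Nat => ((s.1 + (k:Int) * d.1, s.2 + (k:Int) * d.2),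
            get2 r (s.1 + ((k:Int) - 1) * d.1) (s.2 + ((k:Int) - 1) * d.2))) ∘ Nat.succ)
        = Wseg r (s.1 + d.1, s.2 + d.2) d n := by
      simp only [Wseg]
      apply List.map_congr_left
      intro k _
      simp only [Function.comp]
      have c1 : s.1 + ((k:Int)+1) * d.1 = (s.1 + d.1) + (k:Int) * d.1 := by ring
      have c2 : s.2 + ((k:Int)+1) * d.2 = (s.2 + d.2) + (k:Int) * d.2 := by ring
      have c3 : s.1 + (((k:Int)+1) - 1) * d.1 = (s.1 + d.1) + ((k:Int) - 1) * d.1 := by ring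
      have c4 : s.2 + (((k:Int)+1) - 1) * d.2 = (s.2 + d.2) + ((k:Int) - 1) * d.2 := by ring
      push_cast
      rw [c1, c2, c3, c4]
    rw [e1, e2]
    congr 1
    · refine congrArg₂ Prod.mk rfl ?_
      rw [hp]
      congr 1 <;> (push_cast; ring)
    · exact ih (s.1 + d.1, s.2 + d.2) _
        (by refine congrArg₂ (get2 r) ?_ ?_ <;> (push_cast; ring))

theorem writesP_seg_flex (r : List (List Int)) (f : Nat → Int × Int) (n : Nat)
    (s1 s2 d1 d2 : Int) (p : Int × Int)
    (hf : ∀ k, k < n → f k = (s1 + (k:Int)*d1, s2 + (k:Int)*d2))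
    (hp : get2 r p.1 p.2 = get2 r (s1 - d1) (s2 - d2)) :
    writesP r p ((List.range n).map f) = Wseg r (s1,s2) (d1,d2) n := by
  rw [List.map_congr_left (fun a ha => hf a (List.mem_range.mp ha))]
  exact writesP_wseg r (d1,d2) n (s1,s2) p hp

theorem windA_eq (room cleaner : List (List Int)) (x1 x2 : Int) (R C : Nat)
    (hRd : room.length = R)
    (hCd : ((PySem.List.pyGet? room 0).getD []).length = C)
    (hx1d : get2 cleaner 0 0 = x1) (hx2d : get2 cleaner 1 0 = x2) :
    wind room cleaner = (listAll room x1 x2 R C).foldl applyW room := by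
  simp only [wind, hRd, hCd, hx1d, hx2d]
  rw [PySem.List.pyRange_one 1 ((C:Int)-1),
      show (((C:Int)-1)-1).toNat = C-2 from by omega, List.foldl_map,
      foldl_pair_set2_map]
  rw [PySem.List.pyRange_neg_one (x1-1) (-1),
      show ((x1-1)-(-1)).toNat = x1.toNat from by omega, List.foldl_map]
  rw [PySem.List.pyRange_neg_one ((C:Int)-2) (-1),
      show (((C:Int)-2)-(-1)).toNat = C-1 from by omega, List.foldl_map]
  rw [PySem.List.pyRange_one 1 x1, List.foldl_map]
  rw [PySem.List.pyRange_one 1 ((R:Int)-x2),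
      show (((R:Int)-x2)-1).toNat = ((R:Int)-x2-1).toNat from by omega, List.foldl_map]
  rw [PySem.List.pyRange_neg_one ((R:Int)-2) x2, List.foldl_map]
  rw [List.foldl_map]
  rw [foldl_set2_map, foldl_set2_map, foldl_set2_map, foldl_set2_map, foldl_set2_map,
      foldl_set2_map]
  rw [map_wseg_flex room _ x1.toNat (x1-1) (-1) (-1) 0
        (by intro k hk; refine congrArg₂ Prod.mk (Prod.ext ?_ ?_) (congrArg₂ (get2 room) ?_ ?_) <;> push_cast <;> ring)]
  rw [map_wseg_flex room _ (C-1) 0 ((C:Int)-2) 0 (-1)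
        (by intro k hk; refine congrArg₂ Prod.mk (Prod.ext ?_ ?_) (congrArg₂ (get2 room) ?_ ?_) <;> push_cast <;> ring)]
  rw [map_wseg_flex room _ (x1-1).toNat 1 0 1 0
        (by intro k hk; refine congrArg₂ Prod.mk (Prod.ext ?_ ?_) (congrArg₂ (get2 room) ?_ ?_) <;> push_cast <;> ring)]
  rw [map_wseg_flex room _ ((R:Int)-x2-1).toNat (x2+1) ((C:Int)-1) 1 0
        (by intro k hk; refine congrArg₂ Prod.mk (Prod.ext ?_ ?_) (congrArg₂ (get2 room) ?_ ?_) <;> push_cast <;> ring)]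
  rw [map_wseg_flex room _ (C-1) ((R:Int)-1) ((C:Int)-2) 0 (-1)
        (by intro k hk; refine congrArg₂ Prod.mk (Prod.ext ?_ ?_) (congrArg₂ (get2 room) ?_ ?_) <;> push_cast <;> ring)]
  rw [map_wseg_flex room _ ((R:Int)-2-x2).toNat ((R:Int)-2) 0 (-1) 0
        (by intro k hk; refine congrArg₂ Prod.mk (Prod.ext ?_ ?_) (congrArg₂ (get2 room) ?_ ?_) <;> push_cast <;> ring)]
  simp only [listAll, upperW, lowerW, mixSeg, List.foldl_append, List.foldl_cons, applyW]

theorem getLast?_map_range' {α : Type} (f : Nat → α) (n : Nat) (h : n ≠ 0) :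
    ((List.range n).map f).getLast? = some (f (n-1)) := by
  cases n with
  | zero => exact absurd rfl h
  | succ m => rw [getLast?_map_range]; rfl

theorem get2_zero_last (room : List (List Int)) (C : Nat)
    (hCd : ((PySem.List.pyGet? room 0).getD []).length = C) :
    get2 room 0 (-1) = get2 room 0 ((C:Int)-1) := by
  unfold get2
  cases hg : PySem.List.pyGet? room 0 with
  | none => simp [PySem.List.pyGet?]
  | some row =>
    have hlen : row.length = C := by rw [hg] at hCd; exact hCd
    simp only [Option.getD_some]
    rcases Nat.eq_zero_or_pos C with h0 | hpos
    · have : row = [] := by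
        cases row with
        | nil => rfl
        | cons a t => simp [h0] at hlen
      subst this
      simp [PySem.List.pyGet?, h0]
    · rw [PySem.List.pyGet?_neg_one, PySem.List.pyGet?_of_nonneg _ (show (0:Int) ≤ (C:Int)-1 by omega)]
      rw [List.getLast?_eq_getElem?]
      have hidx : row.length - 1 = ((C:Int)-1).toNat := by omega
      rw [hidx]

theorem windB_eq (room cleaner : List (List Int)) (x1 x2 : Int) (R C : Nat)
    (hRd : room.length = R)
    (hCd : ((PySem.List.pyGet? room 0).getD []).length = C)
    (hx1d : get2 cleaner 0 0 = x1) (hx2d : get2 cleaner 1 0 = x2)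
    (hx1 : 0 ≤ x1) (hx2R : x2 ≤ (R:Int) - 1) (hC1 : 1 ≤ C) :
    wind_alt room cleaner = (listAll room x1 x2 R C).foldl applyW room := by
  have hg20 := get2_zero_last room C hCd
  simp only [wind_alt, hRd, hCd, hx1d, hx2d]
  rw [PySem.List.pyRange_one 2 (C:Int),
      show ((C:Int)-2).toNat = C-2 from by omega, List.foldl_map, foldl_pair_set2_map]
  rw [PySem.List.pyRange_neg_one (x1-1) (-1),
      show ((x1-1)-(-1)).toNat = x1.toNat from by omega]
  rw [PySem.List.pyRange_neg_one ((C:Int)-2) (-1),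
      show (((C:Int)-2)-(-1)).toNat = C-1 from by omega]
  rw [PySem.List.pyRange_one 1 x1]
  rw [PySem.List.pyRange_one 1 ((R:Int)-x2),
      show (((R:Int)-x2)-1).toNat = ((R:Int)-x2-1).toNat from by omega]
  rw [PySem.List.pyRange_neg_one ((R:Int)-2) x2]
  simp only [List.map_map]
  rw [foldl_stepP room, foldl_stepP room]
  dsimp only
  simp only [Function.comp_def]
  rw [flatMap_pair_congr _ _
      (fun k : Nat => ((x1, 1+(k:Int)+1), get2 room x1 (1+(k:Int))))
      (fun k : Nat => ((x2, 1+(k:Int)+1), get2 room x2 (1+(k:Int))))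
      (List.range (C-2))
      (by intro a ha; constructor <;>
            (refine congrArg₂ Prod.mk (Prod.ext ?_ ?_) (congrArg₂ (get2 room) ?_ ?_)) <;>
          push_cast <;> ring)]
  have hU : writesP room (x1, -1)
      (List.map (fun k : Nat => (x1 - 1 - (k:Int), (-1:Int))) (List.range x1.toNat) ++
        List.map (fun k : Nat => ((0:Int), (C:Int) - 2 - (k:Int))) (List.range (C - 1)) ++
        List.map (fun k : Nat => (1 + (k:Int), (0:Int))) (List.range (x1 - 1).toNat))
      = upperW room x1 C := by
    rw [List.append_assoc, writesP_append, writesP_append]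
    have hseg1 : writesP room (x1, -1)
        (List.map (fun k : Nat => (x1 - 1 - (k:Int), (-1:Int))) (List.range x1.toNat))
        = Wseg room (x1-1, -1) (-1,0) x1.toNat :=
      writesP_seg_flex room _ _ (x1-1) (-1) (-1) 0 _
        (by intro k hk; refine Prod.ext ?_ ?_ <;> (push_cast; ring))
        (by refine congrArg₂ (get2 room) ?_ ?_ <;> ring)
    rcases Nat.eq_zero_or_pos x1.toNat with h10 | h1p
    · have hx10 : x1 = 0 := by omega
      rw [h10] at hseg1 ⊢
      simp only [List.range_zero, List.map_nil, List.getLast?_nil, Option.getD_none]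
      have hseg2 : writesP room (x1, -1)
          (List.map (fun k : Nat => ((0:Int), (C:Int) - 2 - (k:Int))) (List.range (C - 1)))
          = Wseg room (0, (C:Int)-2) (0,-1) (C-1) :=
        writesP_seg_flex room _ _ 0 ((C:Int)-2) 0 (-1) _
          (by intro k hk; refine Prod.ext ?_ ?_ <;> (push_cast; ring))
          (by rw [hx10]; refine hg20.trans ?_; refine congrArg₂ (get2 room) ?_ ?_ <;> ring)
      rw [hseg2]
      rcases Nat.lt_or_ge C 2 with hC2 | hC2
      · have hCe : C = 1 := by omega
        rw [hCe]
        simp only [show (1:Nat)-1 = 0 from rfl, List.range_zero, List.map_nil,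
          List.getLast?_nil, Option.getD_none]
        have hseg3 : writesP room (x1, -1)
            (List.map (fun k : Nat => (1 + (k:Int), (0:Int))) (List.range (x1 - 1).toNat))
            = Wseg room (1,0) (1,0) (x1-1).toNat :=
          writesP_seg_flex room _ _ 1 0 1 0 _
            (by intro k hk; refine Prod.ext ?_ ?_ <;> (push_cast; ring))
            (by rw [hx10]
                refine hg20.trans ?_
                rw [hCe]
                refine congrArg₂ (get2 room) ?_ ?_ <;> norm_num)
        rw [hseg3]
        simp [upperW, Wseg, writesP, h10]
      · rw [getLast?_map_range' _ _ (by omega), Option.getD_some]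
        have hseg3 : writesP room ((0:Int), (C:Int) - 2 - ((C-1-1 : Nat):Int))
            (List.map (fun k : Nat => (1 + (k:Int), (0:Int))) (List.range (x1 - 1).toNat))
            = Wseg room (1,0) (1,0) (x1-1).toNat :=
          writesP_seg_flex room _ _ 1 0 1 0 _
            (by intro k hk; refine Prod.ext ?_ ?_ <;> (push_cast; ring))
            (by refine congrArg₂ (get2 room) ?_ ?_ <;> omega)
        rw [hseg3]
        simp [upperW, Wseg, writesP, h10]
    · rw [getLast?_map_range' _ _ (by omega), Option.getD_some, hseg1]
      have hr0 : x1 - 1 - ((x1.toNat - 1 : Nat) : Int) = 0 := by omega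
      have hseg2 : writesP room (x1 - 1 - ((x1.toNat - 1 : Nat) : Int), -1)
          (List.map (fun k : Nat => ((0:Int), (C:Int) - 2 - (k:Int))) (List.range (C - 1)))
          = Wseg room (0, (C:Int)-2) (0,-1) (C-1) :=
        writesP_seg_flex room _ _ 0 ((C:Int)-2) 0 (-1) _
          (by intro k hk; refine Prod.ext ?_ ?_ <;> (push_cast; ring))
          (by rw [hr0]
              refine hg20.trans ?_
              refine congrArg₂ (get2 room) ?_ ?_ <;> ring)
      rw [hseg2]
      rcases Nat.lt_or_ge C 2 with hC2 | hC2
      · have hCe : C = 1 := by omega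
        rw [hCe]
        simp only [show (1:Nat)-1 = 0 from rfl, List.range_zero, List.map_nil,
          List.getLast?_nil, Option.getD_none]
        have hseg3 : writesP room (x1 - 1 - ((x1.toNat - 1 : Nat) : Int), -1)
            (List.map (fun k : Nat => (1 + (k:Int), (0:Int))) (List.range (x1 - 1).toNat))
            = Wseg room (1,0) (1,0) (x1-1).toNat :=
          writesP_seg_flex room _ _ 1 0 1 0 _
            (by intro k hk; refine Prod.ext ?_ ?_ <;> (push_cast; ring))
            (by rw [hr0]
                refine hg20.trans ?_
                rw [hCe]
                refine congrArg₂ (get2 room) ?_ ?_ <;> norm_num)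
        rw [hseg3]
        simp [upperW, Wseg, writesP, hCe]
      · rw [getLast?_map_range' _ _ (by omega), Option.getD_some]
        have hseg3 : writesP room ((0:Int), (C:Int) - 2 - ((C-1-1 : Nat):Int))
            (List.map (fun k : Nat => (1 + (k:Int), (0:Int))) (List.range (x1 - 1).toNat))
            = Wseg room (1,0) (1,0) (x1-1).toNat :=
          writesP_seg_flex room _ _ 1 0 1 0 _
            (by intro k hk; refine Prod.ext ?_ ?_ <;> (push_cast; ring))
            (by refine congrArg₂ (get2 room) ?_ ?_ <;> omega)
        rw [hseg3]
        simp [upperW]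
  have hL : writesP room (x2, (C:Int)-1)
      (List.map (fun k : Nat => (x2 + (1 + (k:Int)), (C:Int) - 1)) (List.range ((R:Int)-x2-1).toNat) ++
        List.map (fun k : Nat => ((R:Int) - 1, (C:Int) - 2 - (k:Int))) (List.range (C - 1)) ++
        List.map (fun k : Nat => ((R:Int) - 2 - (k:Int), (0:Int))) (List.range ((R:Int)-2-x2).toNat))
      = lowerW room x2 R C := by
    rw [List.append_assoc, writesP_append, writesP_append]
    have hseg1 : writesP room (x2, (C:Int)-1)
        (List.map (fun k : Nat => (x2 + (1 + (k:Int)), (C:Int) - 1)) (List.range ((R:Int)-x2-1).toNat))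
        = Wseg room (x2+1, (C:Int)-1) (1,0) ((R:Int)-x2-1).toNat :=
      writesP_seg_flex room _ _ (x2+1) ((C:Int)-1) 1 0 _
        (by intro k hk; refine Prod.ext ?_ ?_ <;> (push_cast; ring))
        (by refine congrArg₂ (get2 room) ?_ ?_ <;> ring)
    rcases Nat.eq_zero_or_pos ((R:Int)-x2-1).toNat with h10 | h1p
    · have hx2e : x2 = (R:Int) - 1 := by omega
      rw [h10] at hseg1 ⊢
      simp only [List.range_zero, List.map_nil, List.getLast?_nil, Option.getD_none]
      have hseg2 : writesP room (x2, (C:Int)-1)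
          (List.map (fun k : Nat => ((R:Int) - 1, (C:Int) - 2 - (k:Int))) (List.range (C - 1)))
          = Wseg room ((R:Int)-1, (C:Int)-2) (0,-1) (C-1) :=
        writesP_seg_flex room _ _ ((R:Int)-1) ((C:Int)-2) 0 (-1) _
          (by intro k hk; refine Prod.ext ?_ ?_ <;> (push_cast; ring))
          (by refine congrArg₂ (get2 room) ?_ ?_ <;> omega)
      rw [hseg2]
      rcases Nat.lt_or_ge C 2 with hC2 | hC2
      · have hCe : C = 1 := by omega
        rw [hCe]
        simp only [show (1:Nat)-1 = 0 from rfl, List.range_zero, List.map_nil,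
          List.getLast?_nil, Option.getD_none]
        have hseg3 : writesP room (x2, ((1:Nat):Int)-1)
            (List.map (fun k : Nat => ((R:Int) - 2 - (k:Int), (0:Int))) (List.range ((R:Int)-2-x2).toNat))
            = Wseg room ((R:Int)-2, 0) (-1,0) ((R:Int)-2-x2).toNat :=
          writesP_seg_flex room _ _ ((R:Int)-2) 0 (-1) 0 _
            (by intro k hk; refine Prod.ext ?_ ?_ <;> (push_cast; ring))
            (by refine congrArg₂ (get2 room) ?_ ?_ <;> omega)
        rw [hseg3]
        simp [lowerW, Wseg, writesP, h10]
      · rw [getLast?_map_range' _ _ (by omega), Option.getD_some]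
        have hseg3 : writesP room ((R:Int) - 1, (C:Int) - 2 - ((C-1-1 : Nat):Int))
            (List.map (fun k : Nat => ((R:Int) - 2 - (k:Int), (0:Int))) (List.range ((R:Int)-2-x2).toNat))
            = Wseg room ((R:Int)-2, 0) (-1,0) ((R:Int)-2-x2).toNat :=
          writesP_seg_flex room _ _ ((R:Int)-2) 0 (-1) 0 _
            (by intro k hk; refine Prod.ext ?_ ?_ <;> (push_cast; ring))
            (by refine congrArg₂ (get2 room) ?_ ?_ <;> omega)
        rw [hseg3]
        simp [lowerW, Wseg, writesP, h10]
    · rw [getLast?_map_range' _ _ (by omega), Option.getD_some, hseg1]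
      have hr1 : x2 + (1 + ((((R:Int)-x2-1).toNat - 1 : Nat) : Int)) = (R:Int) - 1 := by omega
      have hseg2 : writesP room (x2 + (1 + ((((R:Int)-x2-1).toNat - 1 : Nat) : Int)), (C:Int)-1)
          (List.map (fun k : Nat => ((R:Int) - 1, (C:Int) - 2 - (k:Int))) (List.range (C - 1)))
          = Wseg room ((R:Int)-1, (C:Int)-2) (0,-1) (C-1) :=
        writesP_seg_flex room _ _ ((R:Int)-1) ((C:Int)-2) 0 (-1) _
          (by intro k hk; refine Prod.ext ?_ ?_ <;> (push_cast; ring))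
          (by rw [hr1]
              refine congrArg₂ (get2 room) ?_ ?_ <;> ring)
      rw [hseg2]
      rcases Nat.lt_or_ge C 2 with hC2 | hC2
      · have hCe : C = 1 := by omega
        rw [hCe]
        simp only [show (1:Nat)-1 = 0 from rfl, List.range_zero, List.map_nil,
          List.getLast?_nil, Option.getD_none]
        have hseg3 : writesP room (x2 + (1 + ((((R:Int)-x2-1).toNat - 1 : Nat) : Int)), ((1:Nat):Int)-1)
            (List.map (fun k : Nat => ((R:Int) - 2 - (k:Int), (0:Int))) (List.range ((R:Int)-2-x2).toNat))
            = Wseg room ((R:Int)-2, 0) (-1,0) ((R:Int)-2-x2).toNat :=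
          writesP_seg_flex room _ _ ((R:Int)-2) 0 (-1) 0 _
            (by intro k hk; refine Prod.ext ?_ ?_ <;> (push_cast; ring))
            (by refine congrArg₂ (get2 room) ?_ ?_ <;> omega)
        rw [hseg3]
        simp [lowerW, Wseg, writesP, hCe]
      · rw [getLast?_map_range' _ _ (by omega), Option.getD_some]
        have hseg3 : writesP room ((R:Int) - 1, (C:Int) - 2 - ((C-1-1 : Nat):Int))
            (List.map (fun k : Nat => ((R:Int) - 2 - (k:Int), (0:Int))) (List.range ((R:Int)-2-x2).toNat))
            = Wseg room ((R:Int)-2, 0) (-1,0) ((R:Int)-2-x2).toNat :=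
          writesP_seg_flex room _ _ ((R:Int)-2) 0 (-1) 0 _
            (by intro k hk; refine Prod.ext ?_ ?_ <;> (push_cast; ring))
            (by refine congrArg₂ (get2 room) ?_ ?_ <;> omega)
        rw [hseg3]
        simp [lowerW]
  rw [hU, hL]
  simp only [listAll, upperW, lowerW, mixSeg, List.foldl_append, List.foldl_cons, applyW]

theorem wind_main (room cleaner : List (List Int)) (hpre : Pre_wind room cleaner) :
    wind room cleaner = wind_alt room cleaner := by
  obtain ⟨hR1, hC1, hcl2, hcl01, hcl11, hx1a, hx1b, hx2a, hx2b, -, -, -, -⟩ := hpre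
  have hCd : ((PySem.List.pyGet? room 0).getD []).length = (room.headD []).length := by
    cases room with
    | nil => simp at hR1
    | cons r0 rs => rw [PySem.List.pyGet?_zero_cons]; rfl
  have hx1d : get2 cleaner 0 0 = (cleaner.getD 0 []).getD 0 0 := by
    cases cleaner with
    | nil => simp at hcl2
    | cons c0 cs =>
      unfold get2
      rw [PySem.List.pyGet?_zero_cons]
      cases c0 with
      | nil => simp at hcl01
      | cons a t => rw [Option.getD_some, PySem.List.pyGet?_zero_cons]; rfl
  have hx2d : get2 cleaner 1 0 = (cleaner.getD 1 []).getD 0 0 := by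
    cases cleaner with
    | nil => simp at hcl2
    | cons c0 cs =>
      cases cs with
      | nil => simp at hcl2
      | cons c1 cs' =>
        unfold get2
        rw [PySem.List.pyGet?_of_nonneg _ (by omega : (0:Int) ≤ 1)]
        simp only [Int.toNat_one, List.getElem?_cons_succ, List.getElem?_cons_zero,
          Option.getD_some]
        cases c1 with
        | nil => simp at hcl11
        | cons a t => rw [PySem.List.pyGet?_zero_cons]; rfl
  rw [windA_eq room cleaner _ _ room.length ((room.headD []).length) rfl hCd hx1d hx2d,
      windB_eq room cleaner _ _ room.length ((room.headD []).length) rfl hCd hx1d hx2d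
        hx1a (by omega) hC1]

-- ===== VERDICT (by name: the statement is the Claim_ definition above) =====
theorem wind_spec : Claim_equal_wind := by
  intro room cleaner _ hpre
  unfold Spec_wind
  exact wind_main room cleaner hpre
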